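-- pv_equiv track=rewrite | github.com/rajdeep007123/sheet-doctor | skills/excel-doctor/scripts/diagnose.py | duplicate_headers
-- ===== SOURCE A (Python) =====
-- from collections import Counter
--
-- def duplicate_headers(headers: list[str]) -> list[str]:
--     canonical_to_name = {}
--     counts = Counter()
--     for header in headers:
--         key = header.strip().lower()
--         if not key:
--             continue
--         counts[key] += 1
--         canonical_to_name.setdefault(key, header.strip())
--     return [canonical_to_name[key] for key, n in counts.items() if n > 1]
-- ===== SOURCE B (Python) =====
-- from collections import Counter
--
-- def duplicate_headers(headers: list[str]) -> list[str]:
--     counts = Counter()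
--     for header in headers:
--         key = header.strip().lower()
--         if key:
--             counts[key] += 1
--     result = []
--     emitted = set()
--     for header in headers:
--         key = header.strip().lower()
--         if not key or key in emitted:
--             continue
--         emitted.add(key)
--         if counts[key] > 1:
--             result.append(header.strip())
--     return result
-- ===== Notes on version B (the rewrite author's own statement) =====
-- stated objective: simpler
-- what changed: A interleaves one pass that maintains a key->first-stripped-name dict alongside a Counter and then emits via a comprehension over the counter's items; B drops the auxiliary dict entirely: it counts normalized keys in a first pass, then re-scans the original headers and emits each duplicated key's first stripped occurrence directly with an 'emitted' set.
import Mathlib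
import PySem

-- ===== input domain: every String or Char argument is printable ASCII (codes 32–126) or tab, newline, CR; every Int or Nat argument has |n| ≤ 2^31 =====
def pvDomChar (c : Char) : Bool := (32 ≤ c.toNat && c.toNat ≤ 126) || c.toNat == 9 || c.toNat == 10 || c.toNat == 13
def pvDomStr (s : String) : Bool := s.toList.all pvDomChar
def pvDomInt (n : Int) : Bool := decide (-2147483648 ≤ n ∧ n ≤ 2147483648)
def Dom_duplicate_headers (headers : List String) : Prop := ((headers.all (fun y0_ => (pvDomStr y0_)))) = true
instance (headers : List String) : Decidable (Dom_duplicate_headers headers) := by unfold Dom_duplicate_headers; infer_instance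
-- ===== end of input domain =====

-- B changes the decomposition: instead of one pass that maintains a key→first-name dict alongside the counter
-- and then a comprehension over the counter's items, B counts keys first, then re-scans the original list and
-- emits each duplicated key's first stripped occurrence directly (objective: simpler/alternative, same cost).

-- ===== PORT A =====
-- A's single loop over headers, carrying (canonical_to_name, counts); counts[key] += 1 is
-- counts.insert key (counts.getD key 0 + 1) (exact Counter semantics, cf. foldl_insert_getD_add_one_eq_counter).
def dupAStep (st : PySem.Dict String String × PySem.Dict String Int) (header : String) :
    PySem.Dict String String × PySem.Dict String Int :=
  let key := PySem.Str.lower (PySem.Str.strip header)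
  if key = "" then st
  else (st.1.setdefault key (PySem.Str.strip header), st.2.insert key (st.2.getD key 0 + 1))

-- canonical_to_name[key] in the final comprehension: key is always present, ported as getD with "" (exact here).
def duplicate_headers (headers : List String) : List String :=
  let st := headers.foldl dupAStep (PySem.Dict.empty, PySem.Dict.empty)
  (st.2.items.filter (fun p => decide (1 < p.2))).map (fun p => st.1.getD p.1 "")

-- ===== PORT B =====
-- first pass: the Counter over nonempty normalized keys
def dupCount (d : PySem.Dict String Int) (headers : List String) : PySem.Dict String Int :=
  headers.foldl (fun d header =>
    let key := PySem.Str.lower (PySem.Str.strip header)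
    if key = "" then d else d.insert key (d.getD key 0 + 1)) d

-- second pass: emit header.strip() at the first occurrence of each duplicated key
def dupEmit (counts : PySem.Dict String Int) : List String → PySem.Set String → List String
  | [], _ => []
  | header :: rest, emitted =>
    let key := PySem.Str.lower (PySem.Str.strip header)
    if key = "" ∨ emitted.contains key then dupEmit counts rest emitted
    else if 1 < counts.getD key 0 then
      PySem.Str.strip header :: dupEmit counts rest (emitted.add key)
    else dupEmit counts rest (emitted.add key)

def duplicate_headers_alt (headers : List String) : List String :=
  let counts := dupCount PySem.Dict.empty headers
  dupEmit counts headers PySem.Set.empty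

-- ===== PRECONDITION & SPEC =====
def Spec_duplicate_headers (headers : List String) (out : List String) : Prop := out = duplicate_headers_alt headers
instance (headers : List String) (out : List String) : Decidable (Spec_duplicate_headers headers out) := by unfold Spec_duplicate_headers; infer_instance

-- ===== CLAIM (what is proved, stated in full; the proofs are below) =====
def Claim_equal_duplicate_headers : Prop := ∀ (headers : List String), Dom_duplicate_headers headers → Spec_duplicate_headers headers (duplicate_headers headers)

-- ===== LEMMAS AND PROOFS =====

-- the canon component of A's fold, in isolation
def dupCanon (c : PySem.Dict String String) (headers : List String) : PySem.Dict String String :=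
  headers.foldl (fun c header =>
    let key := PySem.Str.lower (PySem.Str.strip header)
    if key = "" then c else c.setdefault key (PySem.Str.strip header)) c

theorem items_congr (cnt : PySem.Dict String Int) (canon : PySem.Dict String String)
    (l l' : List (String × Int)) (h : l.map Prod.fst = l'.map Prod.fst) :
    (l.filter (fun p => decide (1 < cnt.getD p.1 0))).map (fun p => canon.getD p.1 "")
      = (l'.filter (fun p => decide (1 < cnt.getD p.1 0))).map (fun p => canon.getD p.1 "") := by
  have e : ∀ (m : List (String × Int)),
      (m.filter (fun p => decide (1 < cnt.getD p.1 0))).map (fun p => canon.getD p.1 "")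
        = ((m.map Prod.fst).filter (fun k => decide (1 < cnt.getD k 0))).map
            (fun k => canon.getD k "") := by
    intro m
    rw [List.filter_map, List.map_map]
    rfl
  rw [e, e, h]

theorem dupAStep_fold (headers : List String) (st : PySem.Dict String String × PySem.Dict String Int) :
    headers.foldl dupAStep st = (dupCanon st.1 headers, dupCount st.2 headers) := by
  induction headers generalizing st with
  | nil => rfl
  | cons h t ih =>
    simp only [List.foldl_cons, dupAStep, dupCanon, dupCount] at *
    by_cases hk : PySem.Str.lower (PySem.Str.strip h) = "" <;> simp [hk, ih]

set_option maxHeartbeats 1000000 in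
theorem dup_main (rest : List String) (canon : PySem.Dict String String)
    (counts : PySem.Dict String Int) (emitted : PySem.Set String)
    (hce : ∀ k, k ∈ counts.keys ↔ k ∈ emitted)
    (hcc : ∀ k, k ∈ canon.keys ↔ k ∈ counts.keys)
    (hnd : counts.keys.Nodup) :
    ((dupCount counts rest).items.filter (fun p => decide (1 < p.2))).map
        (fun p => (dupCanon canon rest).getD p.1 "")
      = (counts.items.filter (fun p => decide (1 < (dupCount counts rest).getD p.1 0))).map
          (fun p => canon.getD p.1 "")
        ++ dupEmit (dupCount counts rest) rest emitted := by
  induction rest generalizing canon counts emitted with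
  | nil =>
    simp only [dupCount, List.foldl_nil, dupCanon, dupEmit, List.append_nil]
    rw [List.filter_congr (fun p hp => ?_)]
    obtain ⟨k, v⟩ := p
    have h1 : counts.getD k 0 = v :=
      PySem.Dict.getD_of_mem_items counts hp hnd 0
    simp [h1]
  | cons h t ih =>
    by_cases hk : PySem.Str.lower (PySem.Str.strip h) = ""
    · have e1 : dupCount counts (h :: t) = dupCount counts t := by
        simp [dupCount, hk]
      have e2 : dupCanon canon (h :: t) = dupCanon canon t := by
        simp [dupCanon, hk]
      have e3 : dupEmit (dupCount counts t) (h :: t) emitted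
          = dupEmit (dupCount counts t) t emitted := by
        simp [dupEmit, hk]
      rw [e1, e2, e3]
      exact ih canon counts emitted hce hcc hnd
    · by_cases hc : PySem.Str.lower (PySem.Str.strip h) ∈ counts.keys
      · -- key already counted: counts overwritten in place, canon/emitted unchanged
        have hcb : counts.contains (PySem.Str.lower (PySem.Str.strip h)) = true :=
          (PySem.Dict.contains_iff_mem_keys _ _).mpr hc
        have hcanb : canon.contains (PySem.Str.lower (PySem.Str.strip h)) = true :=
          (PySem.Dict.contains_iff_mem_keys _ _).mpr ((hcc _).mpr hc)
        have hmem : PySem.Str.lower (PySem.Str.strip h) ∈ emitted := (hce _).mp hc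
        have e1 : dupCount counts (h :: t)
            = dupCount (counts.insert (PySem.Str.lower (PySem.Str.strip h))
                (counts.getD (PySem.Str.lower (PySem.Str.strip h)) 0 + 1)) t := by
          simp [dupCount, hk]
        have e2 : dupCanon canon (h :: t) = dupCanon canon t := by
          simp only [dupCanon, List.foldl_cons, if_neg hk,
            PySem.Dict.setdefault_of_contains _ _ hcanb]
        set counts' := counts.insert (PySem.Str.lower (PySem.Str.strip h))
            (counts.getD (PySem.Str.lower (PySem.Str.strip h)) 0 + 1) with hcounts'
        have hkeys' : counts'.keys = counts.keys :=
          PySem.Dict.keys_insert_of_contains _ _ hcb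
        have hce' : ∀ k, k ∈ counts'.keys ↔ k ∈ emitted := by
          intro k; rw [hkeys']; exact hce k
        have hcc' : ∀ k, k ∈ canon.keys ↔ k ∈ counts'.keys := by
          intro k; rw [hkeys']; exact hcc k
        have hnd' : counts'.keys.Nodup := by rw [hkeys']; exact hnd
        have e3 : dupEmit (dupCount counts' t) (h :: t) emitted
            = dupEmit (dupCount counts' t) t emitted := by
          simp [dupEmit, hk, hmem]
        rw [e1, e2, e3, ih canon counts' emitted hce' hcc' hnd']
        have hfst : counts'.items.map Prod.fst = counts.items.map Prod.fst := by
          rw [hcounts', PySem.Dict.items_insert_of_contains _ _ hcb, List.map_map]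
          apply List.map_congr_left
          intro p _
          simp only [Function.comp]
          by_cases hpk : p.1 == PySem.Str.lower (PySem.Str.strip h)
          · simp [hpk]; exact (eq_of_beq hpk).symm
          · simp [hpk]
        rw [items_congr (dupCount counts' t) canon counts'.items counts.items hfst]
      · -- fresh key: appended to counts and canon; first occurrence, emitted grows
        have hcb : counts.contains (PySem.Str.lower (PySem.Str.strip h)) = false := by
          rw [Bool.eq_false_iff]
          intro hh; exact hc ((PySem.Dict.contains_iff_mem_keys _ _).mp hh)
        have hcanb : canon.contains (PySem.Str.lower (PySem.Str.strip h)) = false := by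
          rw [Bool.eq_false_iff]
          intro hh; exact hc ((hcc _).mp ((PySem.Dict.contains_iff_mem_keys _ _).mp hh))
        have hnotmem : PySem.Str.lower (PySem.Str.strip h) ∉ emitted :=
          fun hm => hc ((hce _).mpr hm)
        have e1 : dupCount counts (h :: t)
            = dupCount (counts.insert (PySem.Str.lower (PySem.Str.strip h))
                (counts.getD (PySem.Str.lower (PySem.Str.strip h)) 0 + 1)) t := by
          simp [dupCount, hk]
        have e2 : dupCanon canon (h :: t)
            = dupCanon (canon.insert (PySem.Str.lower (PySem.Str.strip h))
                (PySem.Str.strip h)) t := by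
          simp only [dupCanon, List.foldl_cons, if_neg hk,
            PySem.Dict.setdefault_of_not_contains _ _ hcanb]
        set key := PySem.Str.lower (PySem.Str.strip h) with hkey
        set counts' := counts.insert key (counts.getD key 0 + 1) with hcounts'
        set canon' := canon.insert key (PySem.Str.strip h) with hcanon'
        have hkeys' : counts'.keys = counts.keys ++ [key] :=
          PySem.Dict.keys_insert_of_not_contains _ _ hcb
        have hce' : ∀ k, k ∈ counts'.keys ↔ k ∈ emitted.add key := by
          intro k
          rw [hkeys']
          simp only [List.mem_append, List.mem_singleton, PySem.Set.mem_add]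
          constructor
          · rintro (h1 | h1)
            · exact Or.inl ((hce k).mp h1)
            · exact Or.inr h1
          · rintro (h1 | h1)
            · exact Or.inl ((hce k).mpr h1)
            · exact Or.inr h1
        have hcc' : ∀ k, k ∈ canon'.keys ↔ k ∈ counts'.keys := by
          intro k
          rw [hkeys', hcanon', PySem.Dict.mem_keys_insert]
          simp only [List.mem_append, List.mem_singleton]
          constructor
          · rintro (h1 | h1)
            · exact Or.inr h1
            · exact Or.inl ((hcc k).mp h1)
          · rintro (h1 | h1)
            · exact Or.inr ((hcc k).mpr h1)
            · exact Or.inl h1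
        have hknotmem : key ∉ counts.keys := hc
        have hnd' : counts'.keys.Nodup := by
          rw [hkeys']
          simpa [List.nodup_append] using ⟨hnd, fun a ha hak => hknotmem (hak ▸ ha)⟩
        rw [e1, e2, ih canon' counts' (emitted.add key) hce' hcc' hnd']
        have hitems : counts'.items = counts.items ++ [(key, counts.getD key 0 + 1)] :=
          PySem.Dict.items_insert_of_not_contains _ _ hcb
        rw [hitems, List.filter_append, List.map_append]
        have hold : (counts.items.filter
              (fun p => decide (1 < (dupCount counts' t).getD p.1 0))).map
              (fun p => canon'.getD p.1 "")
            = (counts.items.filter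
              (fun p => decide (1 < (dupCount counts' t).getD p.1 0))).map
              (fun p => canon.getD p.1 "") := by
          apply List.map_congr_left
          intro p hp
          have hpm := List.mem_of_mem_filter hp
          have hpk : p.1 ≠ key := by
            intro hpe
            exact hknotmem (hpe ▸ PySem.Dict.mem_keys_of_mem_items counts hpm)
          rw [hcanon', PySem.Dict.getD_insert_of_ne _ _ _ hpk]
        rw [hold, List.append_assoc]
        have hemit : dupEmit (dupCount counts' t) (h :: t) emitted
            = if 1 < (dupCount counts' t).getD key 0 then
                PySem.Str.strip h :: dupEmit (dupCount counts' t) t (emitted.add key)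
              else dupEmit (dupCount counts' t) t (emitted.add key) := by
          simp [dupEmit, hk, hnotmem, ← hkey]
        have htail : (([(key, counts.getD key 0 + 1)].filter
              (fun p => decide (1 < (dupCount counts' t).getD p.1 0))).map
              (fun p => canon'.getD p.1 ""))
            ++ dupEmit (dupCount counts' t) t (emitted.add key)
            = dupEmit (dupCount counts' t) (h :: t) emitted := by
          rw [hemit]
          by_cases hcnt : 1 < (dupCount counts' t).getD key 0
          · simp [hcnt, hcanon', PySem.Dict.getD_insert_self]
          · simp [hcnt]
        rw [← htail]

-- ===== VERDICT (by name: the statement is the Claim_ definition above) =====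
theorem duplicate_headers_spec : Claim_equal_duplicate_headers := by
  intro headers _
  show duplicate_headers headers = duplicate_headers_alt headers
  unfold duplicate_headers duplicate_headers_alt
  rw [dupAStep_fold]
  have := dup_main headers PySem.Dict.empty PySem.Dict.empty PySem.Set.empty
    (by intro k; simp [PySem.Dict.keys_empty, PySem.Set.empty])
    (by intro k; simp [PySem.Dict.keys_empty])
    (by simp [PySem.Dict.keys_empty])
  simpa using this
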